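-- pv_equiv track=rewrite | github.com/ChrisPy-RuBy/python | utilities/utilities.py | hash_dedupe
-- ===== SOURCE A (Python) =====
-- def hash_dedupe(data):
--     results = {}
--     for k, v in data:
--         if k in results:
--             if hash(v) > hash(results[k]):
--                 results[k] = v
--         else:
--             results[k] = v
--     return list((k, v) for k, v in results.items())
-- ===== SOURCE B (Python) =====
-- def hash_dedupe(data):
--     groups = {}
--     for k, v in data:
--         groups.setdefault(k, []).append(v)
--     return [(k, max(vs, key=hash)) for k, vs in groups.items()]
-- ===== Notes on version B (the rewrite author's own statement) =====
-- stated objective: alternative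
-- what changed: B first groups all values per key with setdefault/append and then reduces each group with max(key=hash) in a second pass, instead of A's single pass keeping one running best per key.
import Mathlib
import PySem

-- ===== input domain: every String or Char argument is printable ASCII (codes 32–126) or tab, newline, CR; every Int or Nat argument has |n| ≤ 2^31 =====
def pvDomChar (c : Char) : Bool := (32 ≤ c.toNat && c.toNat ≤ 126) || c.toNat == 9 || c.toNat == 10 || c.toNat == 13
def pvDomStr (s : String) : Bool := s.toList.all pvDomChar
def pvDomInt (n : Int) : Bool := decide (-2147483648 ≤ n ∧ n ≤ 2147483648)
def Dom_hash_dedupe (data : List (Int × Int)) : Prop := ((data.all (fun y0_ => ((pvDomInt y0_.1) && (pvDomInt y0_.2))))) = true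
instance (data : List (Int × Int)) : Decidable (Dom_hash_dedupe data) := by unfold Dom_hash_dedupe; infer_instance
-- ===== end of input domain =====

-- B groups all values per key first (setdefault/append) and reduces each group with max(key=hash)
-- in a second pass, instead of A's single pass keeping one running best per key (alternative decomposition).

-- Python's hash on ints of |n| ≤ 2^31: hash(n) = n, except hash(-1) = -2 (exact on the stated domain).
def pvHash (v : Int) : Int := if v = -1 then -2 else v

-- ===== PORT A =====
def pvStepA (d : PySem.Dict Int Int) (p : Int × Int) : PySem.Dict Int Int :=
  if d.contains p.1 then
    if pvHash p.2 > pvHash (d.getD p.1 0) then d.insert p.1 p.2 else d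
  else d.insert p.1 p.2

def hash_dedupe (data : List (Int × Int)) : List (Int × Int) :=
  (data.foldl pvStepA PySem.Dict.empty).items

-- ===== PORT B =====
-- max(vs, key=hash): first element with strictly maximal hash (Python max keeps the earlier of ties).
def pvMaxByHash (vs : List Int) : Int :=
  match vs with
  | [] => 0   -- Python max raises on []; never reached (every group is nonempty)
  | v :: rest => rest.foldl (fun best x => if pvHash x > pvHash best then x else best) v

def hash_dedupe_alt (data : List (Int × Int)) : List (Int × Int) :=
  ((data.foldl (fun (g : PySem.Dict Int (List Int)) p => g.modify p.1 [] (· ++ [p.2]))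
      PySem.Dict.empty).items).map (fun p => (p.1, pvMaxByHash p.2))

-- ===== PRECONDITION & SPEC =====
def Spec_hash_dedupe (data : List (Int × Int)) (out : List (Int × Int)) : Prop := out = hash_dedupe_alt data
instance (data : List (Int × Int)) (out : List (Int × Int)) : Decidable (Spec_hash_dedupe data out) := by unfold Spec_hash_dedupe; infer_instance

-- ===== CLAIM (what is proved, stated in full; the proofs are below) =====
def Claim_equal_hash_dedupe : Prop := ∀ (data : List (Int × Int)), Dom_hash_dedupe data → Spec_hash_dedupe data (hash_dedupe data)

-- ===== LEMMAS AND PROOFS =====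

-- running best of a list of values, starting from an optional current best (A's per-key behaviour)
def pvCombine (o : Option Int) (vs : List Int) : Option Int :=
  vs.foldl (fun o v => match o with
    | none => some v
    | some a => some (if pvHash v > pvHash a then v else a)) o

theorem pvCombine_some (a : Int) (vs : List Int) :
    pvCombine (some a) vs = some (vs.foldl (fun best x => if pvHash x > pvHash best then x else best) a) := by
  induction vs generalizing a with
  | nil => rfl
  | cons v vs ih => simp [pvCombine, List.foldl] at *; exact ih _

theorem pvStepA_get? (d : PySem.Dict Int Int) (p : Int × Int) (k : Int) :
    (pvStepA d p).get? k =
      if p.1 = k then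
        (match d.get? k with
          | none => some p.2
          | some a => some (if pvHash p.2 > pvHash a then p.2 else a))
      else d.get? k := by
  unfold pvStepA
  rw [PySem.Dict.contains_eq_isSome_get?]
  by_cases hk : p.1 = k
  · subst hk
    cases h : d.get? p.1 with
    | none => simp [PySem.Dict.get?_insert_self]
    | some a =>
      simp only [Option.isSome_some, if_true]
      rw [PySem.Dict.getD_eq_get?_getD, h]
      by_cases hgt : pvHash p.2 > pvHash a
      · simp [hgt]
      · simp [hgt, h]
  · cases h : d.get? p.1 with
    | none => simp [PySem.Dict.get?_insert, Ne.symm hk, hk]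
    | some a =>
      simp only [Option.isSome_some, if_true]
      by_cases hgt : pvHash p.2 > pvHash (d.getD p.1 0)
      · simp [hgt, PySem.Dict.get?_insert, Ne.symm hk, hk]
      · simp [hgt, hk]

theorem foldA_get? (data : List (Int × Int)) (d : PySem.Dict Int Int) (k : Int) :
    (data.foldl pvStepA d).get? k =
      pvCombine (d.get? k) ((data.filter (fun p => p.1 == k)).map (·.2)) := by
  induction data generalizing d with
  | nil => rfl
  | cons p rest ih =>
    simp only [List.foldl_cons]
    rw [ih]
    by_cases hk : p.1 = k
    · rw [pvStepA_get?]
      simp only [hk, if_true]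
      have : (List.filter (fun p => p.1 == k) (p :: rest)) = p :: rest.filter (fun p => p.1 == k) := by
        simp [List.filter, hk]
      rw [this]
      cases d.get? k with
      | none => rfl
      | some a => rfl
    · rw [pvStepA_get?]
      simp only [hk, if_false]
      have hb : (p.1 == k) = false := by simpa using hk
      have : (List.filter (fun p => p.1 == k) (p :: rest)) = rest.filter (fun p => p.1 == k) := by
        simp [List.filter, hb]
      rw [this]

theorem foldA_keys (data : List (Int × Int)) (d : PySem.Dict Int Int) :
    (data.foldl pvStepA d).keys = PySem.Set.update d.keys (data.map (·.1)) := by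
  induction data generalizing d with
  | nil => rfl
  | cons p rest ih =>
    simp only [List.foldl_cons, List.map_cons]
    rw [ih, PySem.Set.update_cons]
    congr 1
    unfold pvStepA
    by_cases hc : d.contains p.1
    · have hmem : p.1 ∈ d.keys := (PySem.Dict.contains_iff_mem_keys d p.1).mp hc
      rw [PySem.Set.add_of_mem hmem]
      by_cases hgt : pvHash p.2 > pvHash (d.getD p.1 0)
      · simp only [hc, hgt, if_true]
        exact PySem.Dict.keys_insert_of_contains d p.2 hc
      · simp [hc, hgt]
    · have hb : d.contains p.1 = false := by simpa using hc
      have hmem : p.1 ∉ d.keys := fun h => hc ((PySem.Dict.contains_iff_mem_keys d p.1).mpr h)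
      rw [PySem.Set.add_of_not_mem hmem]
      simp only [hb, Bool.false_eq_true, if_false]
      exact PySem.Dict.keys_insert_of_not_contains d p.2 hb

theorem foldA_nodup (data : List (Int × Int)) (d : PySem.Dict Int Int) (h : d.keys.Nodup) :
    (data.foldl pvStepA d).keys.Nodup := by
  induction data generalizing d with
  | nil => exact h
  | cons p rest ih =>
    refine ih _ ?_
    unfold pvStepA
    split_ifs <;> first | exact PySem.Dict.nodup_keys_insert _ _ _ h | exact h

-- ===== VERDICT (by name: the statement is the Claim_ definition above) =====
theorem hash_dedupe_spec : Claim_equal_hash_dedupe := by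
  intro data _
  unfold Spec_hash_dedupe hash_dedupe hash_dedupe_alt
  set dA := data.foldl pvStepA PySem.Dict.empty with hdA
  set dB := data.foldl (fun (g : PySem.Dict Int (List Int)) p => g.modify p.1 [] (· ++ [p.2]))
      PySem.Dict.empty with hdB
  have hndA : dA.keys.Nodup := foldA_nodup data _ (by simp)
  have hndB : dB.keys.Nodup :=
    PySem.Dict.nodup_keys_foldl_modify_key data (·.1) [] (fun _ p => (· ++ [p.2])) _ (by simp)
  have hkB : dB.keys = PySem.Set.update [] (data.map (·.1)) := by
    rw [hdB, PySem.Dict.keys_foldl_modify_key data (·.1) [] (fun _ p => (· ++ [p.2]))]; rfl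
  have hk : dA.keys = dB.keys := by
    rw [hdA, foldA_keys, hkB]; rfl
  rw [PySem.Dict.items_eq_map_keys dA hndA 0, PySem.Dict.items_eq_map_keys dB hndB []]
  rw [List.map_map, hk]
  apply List.map_congr_left
  intro k hkmem
  have hkdata : k ∈ data.map (·.1) := by
    rw [hkB] at hkmem
    have := (PySem.Set.mem_update _ _ _).mp hkmem
    simpa using this
  have hgB : dB.getD k [] = (data.filter (fun p => p.1 == k)).map (·.2) := by
    rw [hdB]
    rw [PySem.Dict.getD_foldl_modify_append]
    simp
  have hne : (data.filter (fun p => p.1 == k)).map (·.2) ≠ [] := by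
    simp only [ne_eq, List.map_eq_nil_iff, List.filter_eq_nil_iff]
    intro hall
    obtain ⟨p, hp, hpk⟩ := List.mem_map.mp hkdata
    exact absurd (by simpa using hpk) (by simpa using hall p hp)
  have hgA : dA.getD k 0 = pvMaxByHash ((data.filter (fun p => p.1 == k)).map (·.2)) := by
    rw [PySem.Dict.getD_eq_get?_getD, hdA, foldA_get?]
    cases hvs : (data.filter (fun p => p.1 == k)).map (·.2) with
    | nil => exact absurd hvs hne
    | cons v vs =>
      have : pvCombine ((PySem.Dict.empty : PySem.Dict Int Int).get? k) (v :: vs)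
          = pvCombine (some v) vs := by simp [pvCombine, PySem.Dict.get?_empty, List.foldl]
      rw [this, pvCombine_some]
      rfl
  simp only [Function.comp]
  rw [hgA, hgB]
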